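-- pv_equiv track=rewrite | github.com/Siyuan-Li201/Lares | code/code/patch_verification/patch_verify.py | parse_control_statement
-- ===== SOURCE A (Python) =====
-- def parse_block(code, index):
--     # Assumes code[index] == '{'
--     brace_stack = []
--     brace_stack.append('{')
--     index += 1
--     length = len(code)
--     while index < length and brace_stack:
--         c = code[index]
--         if c == '{':
--             brace_stack.append('{')
--         elif c == '}':
--             brace_stack.pop()
--         elif c == '"' or c == "'":
--             # Skip strings and character literals
--             quote_char = c
--             index +=1
--             while index < length:
--                 if code[index] == '\\':
--                     index +=2
--                 elif code[index] == quote_char: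
--                     index +=1
--                     break
--                 else:
--                     index +=1
--             continue
--         index +=1
--     return index, not brace_stack  # returns new index, True if braces matched
--
-- def parse_control_statement(code, index):
--     length = len(code)
--     # Skip the control statement keyword
--     while index < length and code[index].isalnum():
--         index +=1
--     # Skip whitespace
--     while index < length and code[index].isspace():
--         index +=1
--     # If there is a '(', skip the condition
--     if index < length and code[index] == '(':
--         paren_count = 1
--         index +=1
--         while index < length and paren_count > 0:
--             if code[index] == '(':
--                 paren_count +=1
--             elif code[index] == ')':
--                 paren_count -=1
--             elif code[index] == '"' or code[index] == "'":
--                 # Skip strings and character literals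
--                 quote_char = code[index]
--                 index +=1
--                 while index < length:
--                     if code[index] == '\\':
--                         index +=2
--                     elif code[index] == quote_char:
--                         index +=1
--                         break
--                     else:
--                         index +=1
--                 continue
--             index +=1
--     # Skip whitespace
--     while index < length and code[index].isspace():
--         index +=1
--     # Now, check if there is a '{' starting a block
--     if index < length and code[index] == '{':
--         # Parse the block
--         start_index = index
--         index, matched = parse_block(code, index)
--         return index, matched
--     else:
--         # No block, just a single statement
--         # We can skip to the next ';'
--         while index < length and code[index] != ';' and code[index] != '\n':
--             index +=1
--         if index < length and code[index] == ';':
--             index +=1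
--         return index, True  # No unmatched braces
-- ===== SOURCE B (Python) =====
-- # B: one single-pass state machine over the characters — one loop with an explicit
-- # state variable (keyword / whitespace / paren / whitespace2 / block / string / stmt)
-- # replaces A's sequence of separate skip loops, the paren counter restart and the
-- # explicit brace stack; string literals become a state instead of a nested loop.
--
-- def parse_control_statement(code, index):
--     n = len(code)
--     st = 'kw'
--     depth = 0
--     q = ''
--     blk = False
--     i = index
--     while i < n:
--         c = code[i]
--         if st == 'kw':
--             if c.isalnum():
--                 i += 1
--             else:
--                 st = 'ws1'
--         elif st == 'ws1':
--             if c.isspace():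
--                 i += 1
--             elif c == '(':
--                 st = 'paren'; depth = 1; i += 1
--             else:
--                 st = 'ws2'
--         elif st == 'paren':
--             if c == '(':
--                 depth += 1; i += 1
--             elif c == ')':
--                 depth -= 1; i += 1
--                 if depth == 0:
--                     st = 'ws2'
--             elif c == '"' or c == "'":
--                 st = 'str'; q = c; blk = False; i += 1
--             else:
--                 i += 1
--         elif st == 'ws2':
--             if c.isspace():
--                 i += 1
--             elif c == '{':
--                 st = 'block'; depth = 1; i += 1
--             else:
--                 st = 'stmt'
--         elif st == 'block':
--             if c == '{':
--                 depth += 1; i += 1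
--             elif c == '}':
--                 depth -= 1; i += 1
--                 if depth == 0:
--                     return i, True
--             elif c == '"' or c == "'":
--                 st = 'str'; q = c; blk = True; i += 1
--             else:
--                 i += 1
--         elif st == 'str':
--             if c == '\\':
--                 i += 2
--             elif c == q:
--                 i += 1
--                 st = 'block' if blk else 'paren'
--             else:
--                 i += 1
--         else:  # 'stmt'
--             if c == ';':
--                 return i + 1, True
--             if c == '\n':
--                 return i, True
--             i += 1
--     return i, st != 'block' and not (st == 'str' and blk)
-- ===== Notes on version B (the rewrite author's own statement) =====
-- stated objective: alternative
-- what changed: A's staged skip loops, paren counter and explicit brace stack are replaced by one single-pass character state machine (one loop, one state variable; string literals are a state instead of nested loops, brace/paren depth a single counter), so B is a different decomposition of the same O(n) scan.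
import Mathlib
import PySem

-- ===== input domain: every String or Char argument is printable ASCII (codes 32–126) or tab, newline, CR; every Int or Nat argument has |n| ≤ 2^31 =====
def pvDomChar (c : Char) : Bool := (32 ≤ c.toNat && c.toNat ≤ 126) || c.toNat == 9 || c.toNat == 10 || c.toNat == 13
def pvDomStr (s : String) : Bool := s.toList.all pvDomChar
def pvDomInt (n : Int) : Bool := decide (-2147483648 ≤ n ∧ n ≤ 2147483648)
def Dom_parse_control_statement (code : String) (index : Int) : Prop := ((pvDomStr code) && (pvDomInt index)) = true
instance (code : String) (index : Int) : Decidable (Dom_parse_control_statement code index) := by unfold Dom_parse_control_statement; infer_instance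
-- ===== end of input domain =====

-- B replaces A's staged skip loops, paren counter and explicit brace stack with one
-- single-pass character state machine (objective: alternative decomposition).

-- ===== PORT A =====
-- A's inline string/char-literal skipper (the inner 'while' in both loops of A),
-- entered with i just past the opening quote q.
def strSkipA (cs : List Char) (q : Char) (i : Int) : Int :=
  if i < PySem.List.len cs then
    match PySem.List.pyGet? cs i with
    | none => i   -- Python raises here (i < -len); excluded by Pre_
    | some c =>
      if c = '\\' then strSkipA cs q (i + 2)
      else if c = q then i + 1
      else strSkipA cs q (i + 1)
  else i
termination_by (PySem.List.len cs - i).toNat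
decreasing_by all_goals (simp [PySem.List.len_eq] at *; omega)

-- i ≤ strSkipA cs q i : cited by the port's decreasing_by.
theorem strSkipA_ge (cs : List Char) (q : Char) (i : Int) : i ≤ strSkipA cs q i := by
  fun_induction strSkipA cs q i <;> omega

-- while index < length and code[index].isalnum(): index += 1
def skipAlnumA (cs : List Char) (i : Int) : Int :=
  if i < PySem.List.len cs then
    match PySem.List.pyGet? cs i with
    | none => i
    | some c => if PySem.Chars.isalnum c then skipAlnumA cs (i + 1) else i
  else i
termination_by (PySem.List.len cs - i).toNat
decreasing_by all_goals (simp [PySem.List.len_eq] at *; omega)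

-- while index < length and code[index].isspace(): index += 1
def skipSpaceA (cs : List Char) (i : Int) : Int :=
  if i < PySem.List.len cs then
    match PySem.List.pyGet? cs i with
    | none => i
    | some c => if PySem.Chars.isspace c then skipSpaceA cs (i + 1) else i
  else i
termination_by (PySem.List.len cs - i).toNat
decreasing_by all_goals (simp [PySem.List.len_eq] at *; omega)

-- while index < length and code[index] != ';' and code[index] != '\n': index += 1
def stmtLoopA (cs : List Char) (i : Int) : Int :=
  if i < PySem.List.len cs then
    match PySem.List.pyGet? cs i with
    | none => i
    | some c => if c ≠ ';' ∧ c ≠ '\n' then stmtLoopA cs (i + 1) else i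
  else i
termination_by (PySem.List.len cs - i).toNat
decreasing_by all_goals (simp [PySem.List.len_eq] at *; omega)

-- A's condition loop: while index < length and paren_count > 0: …
def parenLoopA (cs : List Char) (i : Int) (count : Int) : Int :=
  if i < PySem.List.len cs ∧ 0 < count then
    match PySem.List.pyGet? cs i with
    | none => i
    | some c =>
      if c = '(' then parenLoopA cs (i + 1) (count + 1)
      else if c = ')' then parenLoopA cs (i + 1) (count - 1)
      else if c = '"' ∨ c = '\'' then parenLoopA cs (strSkipA cs c (i + 1)) count
      else parenLoopA cs (i + 1) count
  else i
termination_by (PySem.List.len cs - i).toNat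
decreasing_by
  all_goals simp [PySem.List.len_eq] at *
  · omega
  · omega
  · have := strSkipA_ge cs c (i + 1); omega
  · omega

-- A's parse_block loop: brace_stack is the explicit stack of '{'.
def blockLoopA (cs : List Char) (stack : List Char) (i : Int) : Int × Bool :=
  if i < PySem.List.len cs ∧ stack ≠ [] then
    match PySem.List.pyGet? cs i with
    | none => (i, false)
    | some c =>
      if c = '{' then blockLoopA cs ('{' :: stack) (i + 1)
      else if c = '}' then blockLoopA cs stack.tail (i + 1)
      else if c = '"' ∨ c = '\'' then blockLoopA cs stack (strSkipA cs c (i + 1))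
      else blockLoopA cs stack (i + 1)
  else (i, stack.isEmpty)
termination_by (PySem.List.len cs - i).toNat
decreasing_by
  all_goals simp [PySem.List.len_eq] at *
  · omega
  · omega
  · have := strSkipA_ge cs c (i + 1); omega
  · omega

def parse_control_statement (code : String) (index : Int) : Int × Bool :=
  let cs := code.toList
  let n := PySem.List.len cs
  let i1 := skipAlnumA cs index
  let i2 := skipSpaceA cs i1
  let i3 := if i2 < n ∧ PySem.List.pyGet? cs i2 = some '(' then parenLoopA cs (i2 + 1) 1 else i2
  let i4 := skipSpaceA cs i3
  if i4 < n ∧ PySem.List.pyGet? cs i4 = some '{' then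
    blockLoopA cs ['{'] (i4 + 1)      -- parse_block: push '{', index += 1, loop
  else
    let i5 := stmtLoopA cs i4
    if i5 < n ∧ PySem.List.pyGet? cs i5 = some ';' then (i5 + 1, true) else (i5, true)

-- ===== PORT B =====
-- the machine's state: keyword / whitespace / paren condition / whitespace /
-- block / statement / inside a string literal (quote char, in-block flag)
inductive BSt where
  | kw | ws1 | paren | ws2 | block | stmt
  | str : Char → Bool → BSt
deriving DecidableEq, Repr

-- termination rank of the non-consuming state transitions (kw→ws1→ws2→stmt)
def bRank : BSt → Nat
  | .kw => 3
  | .ws1 => 2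
  | .ws2 => 1
  | _ => 0

-- the loop's final flag: False only when input ends inside an unclosed block
def bEof : BSt → Bool
  | .block => false
  | .str _ blk => !blk
  | .kw => true
  | .ws1 => true
  | .ws2 => true
  | .stmt => true
  | .paren => true

-- the two shapes of the termination argument (proved once; the per-call proofs stay tiny)
theorem pvDecStep (n i k : Int) (r r' : Nat) (hi : i < n) (hk : 1 ≤ k) (hr : r' ≤ 3) :
    4 * (n - (i + k)).toNat + r' < 4 * (n - i).toNat + r := by omega

theorem pvDecRank (m r r' : Nat) (h : r' < r) : m + r' < m + r := Nat.add_lt_add_left h m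

-- B's single while-loop: one step per character, the state variable selects the branch
def bRun (cs : List Char) (st : BSt) (depth : Int) (i : Int) : Int × Bool :=
  if i < PySem.List.len cs then
    match PySem.List.pyGet? cs i with
    | none => (i, true)   -- Python raises here (i < -len); excluded by Pre_
    | some c =>
      match st with
      | .kw =>
          if PySem.Chars.isalnum c then bRun cs .kw depth (i + 1)
          else bRun cs .ws1 depth i
      | .ws1 =>
          if PySem.Chars.isspace c then bRun cs .ws1 depth (i + 1)
          else if c = '(' then bRun cs .paren 1 (i + 1)
          else bRun cs .ws2 depth i
      | .paren =>
          if c = '(' then bRun cs .paren (depth + 1) (i + 1)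
          else if c = ')' then
            if depth - 1 = 0 then bRun cs .ws2 (depth - 1) (i + 1)
            else bRun cs .paren (depth - 1) (i + 1)
          else if c = '"' ∨ c = '\'' then bRun cs (.str c false) depth (i + 1)
          else bRun cs .paren depth (i + 1)
      | .ws2 =>
          if PySem.Chars.isspace c then bRun cs .ws2 depth (i + 1)
          else if c = '{' then bRun cs .block 1 (i + 1)
          else bRun cs .stmt depth i
      | .block =>
          if c = '{' then bRun cs .block (depth + 1) (i + 1)
          else if c = '}' then
            if depth - 1 = 0 then (i + 1, true)
            else bRun cs .block (depth - 1) (i + 1)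
          else if c = '"' ∨ c = '\'' then bRun cs (.str c true) depth (i + 1)
          else bRun cs .block depth (i + 1)
      | .str q blk =>
          if c = '\\' then bRun cs (.str q blk) depth (i + 2)
          else if c = q then bRun cs (if blk then .block else .paren) depth (i + 1)
          else bRun cs (.str q blk) depth (i + 1)
      | .stmt =>
          if c = ';' then (i + 1, true)
          else if c = '\n' then (i, true)
          else bRun cs .stmt depth (i + 1)
  else
    (i, bEof st)
termination_by 4 * (PySem.List.len cs - i).toNat + bRank st
decreasing_by
  all_goals simp only [bRank]
  all_goals first
    | exact pvDecRank _ _ _ (by decide)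
    | (apply pvDecStep <;> first | assumption | (cases blk <;> decide) | decide | omega)

def parse_control_statement_alt (code : String) (index : Int) : Int × Bool :=
  bRun code.toList .kw 0 index

-- ===== PRECONDITION & SPEC =====
-- Python A raises IndexError exactly when index < -len(code) (the first code[index]
-- wraps a negative index); Pre_ excludes exactly those inputs.
def Pre_parse_control_statement (code : String) (index : Int) : Prop :=
  -(PySem.Str.len code) ≤ index
instance (code : String) (index : Int) : Decidable (Pre_parse_control_statement code index) := by
  unfold Pre_parse_control_statement; infer_instance

def pvWitness_parse_control_statement : String × Int := ("if (x > 0) { y = 1; }", 0)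

def Spec_parse_control_statement (code : String) (index : Int) (out : Int × Bool) : Prop := out = parse_control_statement_alt code index
instance (code : String) (index : Int) (out : Int × Bool) : Decidable (Spec_parse_control_statement code index out) := by unfold Spec_parse_control_statement; infer_instance

-- ===== CLAIM (what is proved, stated in full; the proofs are below) =====
def Claim_equal_parse_control_statement : Prop := ∀ (code : String) (index : Int), Dom_parse_control_statement code index → Pre_parse_control_statement code index → Spec_parse_control_statement code index (parse_control_statement code index)

-- ===== LEMMAS AND PROOFS =====

theorem pyGet?_some_range (cs : List Char) (i : Int) (c : Char)
    (h : PySem.List.pyGet? cs i = some c) : -(cs.length : Int) ≤ i ∧ i < cs.length := by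
  rcases Decidable.em (PySem.Raise.InRange cs.length i) with hr | hr
  · unfold PySem.Raise.InRange at hr; exact hr
  · rw [← PySem.List.pyGet?_eq_none_iff] at hr; simp [h] at hr

-- one step of the machine: end of input
theorem bRun_eof (cs : List Char) (st : BSt) (d i : Int)
    (hi : ¬ i < PySem.List.len cs) :
    bRun cs st d i = (i, bEof st) := by
  rw [bRun.eq_def, if_neg hi]

-- one step of the machine: negative out-of-range read (excluded by Pre_)
theorem bRun_none (cs : List Char) (st : BSt) (d i : Int)
    (hi : i < PySem.List.len cs) (hn : PySem.List.pyGet? cs i = none) :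
    bRun cs st d i = (i, true) := by
  rw [bRun.eq_def, if_pos hi, hn]

-- one step of the machine: dispatch on the state for the character read
theorem bRun_step (cs : List Char) (st : BSt) (d i : Int) (c : Char)
    (hi : i < PySem.List.len cs) (hc : PySem.List.pyGet? cs i = some c) :
    bRun cs st d i =
      (match st with
      | .kw =>
          if PySem.Chars.isalnum c then bRun cs .kw d (i + 1)
          else bRun cs .ws1 d i
      | .ws1 =>
          if PySem.Chars.isspace c then bRun cs .ws1 d (i + 1)
          else if c = '(' then bRun cs .paren 1 (i + 1)
          else bRun cs .ws2 d i
      | .paren =>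
          if c = '(' then bRun cs .paren (d + 1) (i + 1)
          else if c = ')' then
            if d - 1 = 0 then bRun cs .ws2 (d - 1) (i + 1)
            else bRun cs .paren (d - 1) (i + 1)
          else if c = '"' ∨ c = '\'' then bRun cs (.str c false) d (i + 1)
          else bRun cs .paren d (i + 1)
      | .ws2 =>
          if PySem.Chars.isspace c then bRun cs .ws2 d (i + 1)
          else if c = '{' then bRun cs .block 1 (i + 1)
          else bRun cs .stmt d i
      | .block =>
          if c = '{' then bRun cs .block (d + 1) (i + 1)
          else if c = '}' then
            if d - 1 = 0 then (i + 1, true)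
            else bRun cs .block (d - 1) (i + 1)
          else if c = '"' ∨ c = '\'' then bRun cs (.str c true) d (i + 1)
          else bRun cs .block d (i + 1)
      | .str q blk =>
          if c = '\\' then bRun cs (.str q blk) d (i + 2)
          else if c = q then bRun cs (if blk then .block else .paren) d (i + 1)
          else bRun cs (.str q blk) d (i + 1)
      | .stmt =>
          if c = ';' then (i + 1, true)
          else if c = '\n' then (i, true)
          else bRun cs .stmt d (i + 1)) := by
  cases st <;> rw [bRun.eq_def, if_pos hi, hc]

-- the string state runs A's string skipper, then resumes in paren/block
theorem str_eq (cs : List Char) (q : Char) (blk : Bool) (d i : Int) :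
    bRun cs (.str q blk) d i =
      bRun cs (if blk then .block else .paren) d (strSkipA cs q i) := by
  fun_induction strSkipA cs q i with
  | case1 i hi hn =>
      rw [bRun_none cs _ d i hi hn, bRun_none cs _ d i hi hn]
  | case2 i hi hc ih =>
      rw [bRun_step cs _ d i '\\' hi hc]; dsimp only
      rw [if_pos rfl]; exact ih
  | case3 i hi hc h1 =>
      rw [bRun_step cs _ d i q hi hc]; dsimp only
      rw [if_neg h1, if_pos rfl]
  | case4 i hi c hc h1 h2 ih =>
      rw [bRun_step cs _ d i c hi hc]; dsimp only
      rw [if_neg h1, if_neg h2]; exact ih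
  | case5 i hi =>
      rw [bRun_eof cs _ d i hi, bRun_eof cs _ d i hi]
      cases blk <;> rfl

-- the kw state runs A's alnum skipper, then becomes ws1
theorem kw_eq (cs : List Char) (d i : Int) :
    bRun cs .kw d i = bRun cs .ws1 d (skipAlnumA cs i) := by
  fun_induction skipAlnumA cs i with
  | case1 i hi hn =>
      rw [bRun_none cs _ d i hi hn, bRun_none cs _ d i hi hn]
  | case2 i hi c hc h1 ih =>
      rw [bRun_step cs _ d i c hi hc]; dsimp only
      rw [if_pos h1]; exact ih
  | case3 i hi c hc h1 =>
      rw [bRun_step cs _ d i c hi hc]; dsimp only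
      rw [if_neg h1]
  | case4 i hi =>
      rw [bRun_eof cs _ d i hi, bRun_eof cs _ d i hi]; rfl

-- the ws1 state runs A's whitespace skipper, then A's '(' test
theorem ws1_eq (cs : List Char) (d i : Int) :
    bRun cs .ws1 d i =
      (if skipSpaceA cs i < PySem.List.len cs ∧
          PySem.List.pyGet? cs (skipSpaceA cs i) = some '(' then
        bRun cs .paren 1 (skipSpaceA cs i + 1)
      else bRun cs .ws2 d (skipSpaceA cs i)) := by
  fun_induction skipSpaceA cs i with
  | case1 i hi hn =>
      rw [if_neg (by intro h; rw [hn] at h; exact absurd h.2 (by simp))]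
      rw [bRun_none cs _ d i hi hn, bRun_none cs _ d i hi hn]
  | case2 i hi c hc h1 ih =>
      rw [bRun_step cs _ d i c hi hc]; dsimp only
      rw [if_pos h1]; exact ih
  | case3 i hi c hc h1 =>
      rw [bRun_step cs _ d i c hi hc]; dsimp only
      rw [if_neg h1]
      by_cases h2 : c = '('
      · subst h2
        rw [if_pos rfl, if_pos ⟨hi, hc⟩]
      · rw [if_neg h2, if_neg (by intro h; rw [hc] at h; exact h2 (Option.some.inj h.2))]
  | case4 i hi =>
      rw [if_neg (fun h => hi h.1)]
      rw [bRun_eof cs _ d i hi, bRun_eof cs _ d i hi]; rfl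

-- the ws2 state runs A's whitespace skipper, then A's '{' test
theorem ws2_eq (cs : List Char) (d i : Int) :
    bRun cs .ws2 d i =
      (if skipSpaceA cs i < PySem.List.len cs ∧
          PySem.List.pyGet? cs (skipSpaceA cs i) = some '{' then
        bRun cs .block 1 (skipSpaceA cs i + 1)
      else bRun cs .stmt d (skipSpaceA cs i)) := by
  fun_induction skipSpaceA cs i with
  | case1 i hi hn =>
      rw [if_neg (by intro h; rw [hn] at h; exact absurd h.2 (by simp))]
      rw [bRun_none cs _ d i hi hn, bRun_none cs _ d i hi hn]
  | case2 i hi c hc h1 ih =>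
      rw [bRun_step cs _ d i c hi hc]; dsimp only
      rw [if_pos h1]; exact ih
  | case3 i hi c hc h1 =>
      rw [bRun_step cs _ d i c hi hc]; dsimp only
      rw [if_neg h1]
      by_cases h2 : c = '{'
      · subst h2
        rw [if_pos rfl, if_pos ⟨hi, hc⟩]
      · rw [if_neg h2, if_neg (by intro h; rw [hc] at h; exact h2 (Option.some.inj h.2))]
  | case4 i hi =>
      rw [if_neg (fun h => hi h.1)]
      rw [bRun_eof cs _ d i hi, bRun_eof cs _ d i hi]; rfl

-- the stmt state runs A's ';'/'\n' scan, then A's trailing ';' test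
theorem stmt_eq (cs : List Char) (d i : Int) :
    bRun cs .stmt d i =
      (if stmtLoopA cs i < PySem.List.len cs ∧
          PySem.List.pyGet? cs (stmtLoopA cs i) = some ';' then
        (stmtLoopA cs i + 1, true)
      else (stmtLoopA cs i, true)) := by
  fun_induction stmtLoopA cs i with
  | case1 i hi hn =>
      rw [if_neg (by intro h; rw [hn] at h; exact absurd h.2 (by simp))]
      rw [bRun_none cs _ d i hi hn]
  | case2 i hi c hc h1 ih =>
      rw [bRun_step cs _ d i c hi hc]; dsimp only
      rw [if_neg h1.1, if_neg h1.2]; exact ih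
  | case3 i hi c hc h1 =>
      rw [bRun_step cs _ d i c hi hc]; dsimp only
      by_cases h2 : c = ';'
      · subst h2
        rw [if_pos rfl, if_pos ⟨hi, hc⟩]
      · have h3 : c = '\n' := by
          by_cases h3 : c = '\n'
          · exact h3
          · exact absurd ⟨h2, h3⟩ h1
        subst h3
        rw [if_neg h2, if_pos rfl,
          if_neg (by intro h; rw [hc] at h; exact h2 (Option.some.inj h.2))]
  | case4 i hi =>
      rw [if_neg (fun h => hi h.1)]
      rw [bRun_eof cs _ d i hi]; rfl

-- the paren state with counter value `count` runs A's condition loop, then becomes ws2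
theorem paren_eq (cs : List Char) (b : Nat) :
    ∀ (i count : Int), (PySem.List.len cs - i).toNat ≤ b → 0 < count →
    bRun cs .paren count i = bRun cs .ws2 0 (parenLoopA cs i count) := by
  induction b with
  | zero =>
    intro i count hb hc
    simp only [PySem.List.len_eq] at hb
    have hi : ¬ i < PySem.List.len cs := by simp only [PySem.List.len_eq]; omega
    rw [parenLoopA, if_neg (fun h => hi h.1)]
    rw [bRun_eof cs _ count i hi, bRun_eof cs _ 0 i hi]; rfl
  | succ b ih =>
    intro i count hb hc
    simp only [PySem.List.len_eq] at hb
    by_cases hi : i < PySem.List.len cs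
    case neg =>
      rw [parenLoopA, if_neg (fun h => hi h.1)]
      rw [bRun_eof cs _ count i hi, bRun_eof cs _ 0 i hi]; rfl
    case pos =>
      rw [parenLoopA, if_pos ⟨hi, hc⟩]
      rcases h : PySem.List.pyGet? cs i with _ | c
      · rw [bRun_none cs _ count i hi h, bRun_none cs _ 0 i hi h]
      · have hlen : PySem.List.len cs = (cs.length : Int) := PySem.List.len_eq cs
        rw [bRun_step cs _ count i c hi h]; dsimp only
        split_ifs with h1 h2 h3 h4
        · exact ih (i + 1) (count + 1) (by omega) (by omega)
        · rw [h3, parenLoopA, if_neg (fun hx => absurd hx.2 (by omega))]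
        · exact ih (i + 1) (count - 1) (by omega) (by omega)
        · rw [str_eq]
          simp only [Bool.false_eq_true, if_false]
          have := strSkipA_ge cs c (i + 1)
          exact ih (strSkipA cs c (i + 1)) count (by omega) hc
        · exact ih (i + 1) count (by omega) hc

-- the block state with depth `count` runs A's parse_block loop with a stack of count '{'s
theorem block_eq (cs : List Char) (b : Nat) :
    ∀ (i count : Int), (PySem.List.len cs - i).toNat ≤ b → 0 < count →
      -(cs.length : Int) ≤ i →
    bRun cs .block count i = blockLoopA cs (List.replicate count.toNat '{') i := by
  induction b with
  | zero =>
    intro i count hb hc hneg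
    simp only [PySem.List.len_eq] at hb
    have hi : ¬ i < PySem.List.len cs := by simp only [PySem.List.len_eq]; omega
    rw [blockLoopA, if_neg (fun h => hi h.1)]
    rw [bRun_eof cs _ count i hi]
    have he : ¬ (List.replicate count.toNat '{').isEmpty := by
      simp [List.isEmpty_iff]; omega
    simp only [Bool.not_eq_true] at he
    rw [he]
    rfl
  | succ b ih =>
    intro i count hb hc hneg
    simp only [PySem.List.len_eq] at hb
    by_cases hi : i < PySem.List.len cs
    case neg =>
      rw [blockLoopA, if_neg (fun h => hi h.1)]
      rw [bRun_eof cs _ count i hi]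
      have he : ¬ (List.replicate count.toNat '{').isEmpty := by
        simp [List.isEmpty_iff]; omega
      simp only [Bool.not_eq_true] at he
      rw [he]
      rfl
    case pos =>
      have hne : List.replicate count.toNat '{' ≠ [] := by simp; omega
      rw [blockLoopA, if_pos ⟨hi, hne⟩]
      have hlen : PySem.List.len cs = (cs.length : Int) := PySem.List.len_eq cs
      rcases h : PySem.List.pyGet? cs i with _ | c
      · exfalso
        rw [PySem.List.pyGet?_eq_none_iff] at h
        unfold PySem.Raise.InRange at h
        simp only [not_and, not_le, not_lt] at h
        omega
      · rw [bRun_step cs _ count i c hi h]; dsimp only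
        split_ifs with h1 h2 h3 h4
        · rw [ih (i + 1) (count + 1) (by omega) (by omega) (by omega)]
          congr 1
          have hct : (count + 1).toNat = count.toNat + 1 := by omega
          rw [hct, List.replicate_succ]
        · have hc1 : count = 1 := by omega
          subst hc1
          have h1t : ((1:Int)).toNat = 1 := rfl
          rw [h1t]
          simp only [List.replicate, List.tail_cons]
          rw [blockLoopA, if_neg (fun hx => hx.2 rfl)]
          rfl
        · rw [ih (i + 1) (count - 1) (by omega) (by omega) (by omega)]
          congr 1
          have h1t : count.toNat = (count - 1).toNat + 1 := by omega
          rw [h1t, List.replicate_succ, List.tail_cons]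
        · rw [str_eq]
          simp only [if_pos]
          have := strSkipA_ge cs c (i + 1)
          exact ih (strSkipA cs c (i + 1)) count (by omega) hc (by omega)
        · exact ih (i + 1) count (by omega) hc (by omega)

-- the ws2 state runs the whole tail of A (whitespace, '{' test, block or statement)
theorem ws2_tail (cs : List Char) (j : Int) :
    bRun cs .ws2 0 j =
      (if skipSpaceA cs j < PySem.List.len cs ∧
          PySem.List.pyGet? cs (skipSpaceA cs j) = some '{' then
        blockLoopA cs ['{'] (skipSpaceA cs j + 1)
      else
        if stmtLoopA cs (skipSpaceA cs j) < PySem.List.len cs ∧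
            PySem.List.pyGet? cs (stmtLoopA cs (skipSpaceA cs j)) = some ';' then
          (stmtLoopA cs (skipSpaceA cs j) + 1, true)
        else (stmtLoopA cs (skipSpaceA cs j), true)) := by
  rw [ws2_eq]
  by_cases hb : skipSpaceA cs j < PySem.List.len cs ∧
      PySem.List.pyGet? cs (skipSpaceA cs j) = some '{'
  · rw [if_pos hb, if_pos hb]
    have hneg := (pyGet?_some_range cs _ '{' hb.2).1
    rw [block_eq cs (PySem.List.len cs - (skipSpaceA cs j + 1)).toNat _ 1 le_rfl
      (by omega) (by omega)]
    have hrep : List.replicate (Int.toNat 1) '{' = ['{'] := rfl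
    rw [hrep]
  · rw [if_neg hb, if_neg hb, stmt_eq]

theorem parse_control_statement_eq_alt (code : String) (index : Int) :
    parse_control_statement code index = parse_control_statement_alt code index := by
  simp only [parse_control_statement, parse_control_statement_alt]
  rw [kw_eq, ws1_eq]
  by_cases hp : skipSpaceA code.toList (skipAlnumA code.toList index) < PySem.List.len code.toList ∧
      PySem.List.pyGet? code.toList (skipSpaceA code.toList (skipAlnumA code.toList index)) = some '('
  · rw [if_pos hp, if_pos hp,
      paren_eq code.toList
        ((PySem.List.len code.toList -
          (skipSpaceA code.toList (skipAlnumA code.toList index) + 1)).toNat)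
        _ 1 le_rfl (by omega),
      ws2_tail]
  · rw [if_neg hp, if_neg hp, ws2_tail]

-- ===== VERDICT (by name: the statement is the Claim_ definition above) =====
theorem parse_control_statement_spec : Claim_equal_parse_control_statement := by
  intro code index _ _
  unfold Spec_parse_control_statement
  exact parse_control_statement_eq_alt code index
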